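-- pv_equiv track=rewrite | github.com/dphdmn/dphbot | splits.py | get_repeated_lengths
-- ===== SOURCE A (Python) =====
-- from typing import List, Dict, Tuple, Optional, Union
--
-- def get_repeated_lengths(input_string: str) -> Dict[str, int]:
--     repeated_width = 0
--     repeated_height = 0
--
--     for i in range(1, len(input_string)):
--         if input_string[i] == input_string[i - 1]:
--             if input_string[i] in 'DU':
--                 repeated_height += 1
--             if input_string[i] in 'RL':
--                 repeated_width += 1
--     return {'repeatedWidth': repeated_width, 'repeatedHeight': repeated_height}
-- ===== SOURCE B (Python) =====
-- from itertools import groupby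
--
-- def get_repeated_lengths(input_string: str):
--     repeated_width = 0
--     repeated_height = 0
--     for ch, grp in groupby(input_string):
--         extra = sum(1 for _ in grp) - 1
--         if ch in 'DU':
--             repeated_height += extra
--         elif ch in 'RL':
--             repeated_width += extra
--     return {'repeatedWidth': repeated_width, 'repeatedHeight': repeated_height}
-- ===== Notes on version B (the rewrite author's own statement) =====
-- stated objective: idiomatic
-- what changed: B groups the string into maximal runs of identical characters (itertools.groupby) and adds run_length-1 per D/U or R/L run, instead of A's index loop comparing each character with its predecessor.
import Mathlib
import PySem

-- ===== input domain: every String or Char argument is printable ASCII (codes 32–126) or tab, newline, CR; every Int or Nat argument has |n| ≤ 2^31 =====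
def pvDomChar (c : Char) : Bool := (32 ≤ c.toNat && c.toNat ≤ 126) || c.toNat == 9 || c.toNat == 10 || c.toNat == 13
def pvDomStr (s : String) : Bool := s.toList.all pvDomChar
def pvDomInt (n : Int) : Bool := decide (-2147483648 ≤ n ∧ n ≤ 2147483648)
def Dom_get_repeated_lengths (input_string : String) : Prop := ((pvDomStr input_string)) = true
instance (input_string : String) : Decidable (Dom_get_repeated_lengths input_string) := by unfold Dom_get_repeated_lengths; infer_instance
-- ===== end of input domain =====

-- B replaces A's index loop by grouping the string into maximal runs and adding run_length-1 per D/U or R/L run (idiomatic; same cost).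

-- ===== PORT A =====
-- for i in range(1, len(s)): compare s[i] with s[i-1]; indices are always in range, read via pyGetD
def get_repeated_lengths (input_string : String) : List (String × Int) :=
  let cs := input_string.toList
  let st := (PySem.List.pyRange 1 (PySem.Str.len input_string) 1).foldl
    (fun (acc : Int × Int) (i : Int) =>
      if PySem.List.pyGetD cs i ' ' = PySem.List.pyGetD cs (i - 1) ' ' then
        let acc := if PySem.List.pyGetD cs i ' ' ∈ (['D', 'U'] : List Char) then (acc.1, acc.2 + 1) else acc
        if PySem.List.pyGetD cs i ' ' ∈ (['R', 'L'] : List Char) then (acc.1 + 1, acc.2) else acc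
      else acc) ((0 : Int), (0 : Int))
  [("repeatedWidth", st.1), ("repeatedHeight", st.2)]

-- ===== PORT B =====
-- run-length grouping (itertools.groupby): list of (char, run length)
def pvRunsAux : Char → Nat → List Char → List (Char × Nat)
  | c, n, [] => [(c, n)]
  | c, n, d :: ds => if d = c then pvRunsAux c (n + 1) ds else (c, n) :: pvRunsAux d 1 ds

def pvRuns : List Char → List (Char × Nat)
  | [] => []
  | c :: cs => pvRunsAux c 1 cs

def get_repeated_lengths_alt (input_string : String) : List (String × Int) :=
  let st := (pvRuns input_string.toList).foldl
    (fun (acc : Int × Int) (p : Char × Nat) =>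
      if p.1 ∈ (['D', 'U'] : List Char) then (acc.1, acc.2 + ((p.2 : Int) - 1))
      else if p.1 ∈ (['R', 'L'] : List Char) then (acc.1 + ((p.2 : Int) - 1), acc.2)
      else acc) ((0 : Int), (0 : Int))
  [("repeatedWidth", st.1), ("repeatedHeight", st.2)]

-- ===== PRECONDITION & SPEC =====
def Spec_get_repeated_lengths (input_string : String) (out : List (String × Int)) : Prop := out = get_repeated_lengths_alt input_string
instance (input_string : String) (out : List (String × Int)) : Decidable (Spec_get_repeated_lengths input_string out) := by unfold Spec_get_repeated_lengths; infer_instance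

-- ===== CLAIM (what is proved, stated in full; the proofs are below) =====
def Claim_equal_get_repeated_lengths : Prop := ∀ (input_string : String), Dom_get_repeated_lengths input_string → Spec_get_repeated_lengths input_string (get_repeated_lengths input_string)

-- ===== LEMMAS AND PROOFS =====

-- contribution of m adjacent duplicates of char c, as a (width, height) vector
def pvDelta (c : Char) (m : Int) : Int × Int :=
  (if c = 'R' ∨ c = 'L' then m else 0, if c = 'D' ∨ c = 'U' then m else 0)

-- adjacent-duplicate totals of p :: cs, by structural recursion
def pvPairs : Char → List Char → Int × Int
  | _, [] => (0, 0)
  | p, c :: cs =>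
    let r := pvPairs c cs
    let d := if c = p then pvDelta c 1 else ((0 : Int), (0 : Int))
    (d.1 + r.1, d.2 + r.2)

-- A's loop body on a (prev, cur) pair
def pvBodyA (acc : Int × Int) (pr : Char × Char) : Int × Int :=
  if pr.2 = pr.1 then
    let acc := if pr.2 ∈ (['D', 'U'] : List Char) then (acc.1, acc.2 + 1) else acc
    if pr.2 ∈ (['R', 'L'] : List Char) then (acc.1 + 1, acc.2) else acc
  else acc

-- B's loop body on a (char, run length) pair
def pvBodyB (acc : Int × Int) (p : Char × Nat) : Int × Int :=
  if p.1 ∈ (['D', 'U'] : List Char) then (acc.1, acc.2 + ((p.2 : Int) - 1))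
  else if p.1 ∈ (['R', 'L'] : List Char) then (acc.1 + ((p.2 : Int) - 1), acc.2)
  else acc

theorem pvBodyA_eq (acc : Int × Int) (p c : Char) :
    pvBodyA acc (p, c)
      = if c = p then (acc.1 + (pvDelta c 1).1, acc.2 + (pvDelta c 1).2) else acc := by
  simp only [pvBodyA, pvDelta, List.mem_cons, List.not_mem_nil, or_false]
  by_cases h : c = p
  · simp only [if_pos h]
    by_cases hdu : c = 'D' ∨ c = 'U'
    · have hrl : ¬(c = 'R' ∨ c = 'L') := by rcases hdu with rfl | rfl <;> decide
      simp [hdu, hrl]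
    · by_cases hrl : c = 'R' ∨ c = 'L' <;> simp [hdu, hrl]
  · simp [h]

theorem pvBodyB_eq (acc : Int × Int) (p : Char) (n : Nat) :
    pvBodyB acc (p, n)
      = (acc.1 + (pvDelta p ((n : Int) - 1)).1, acc.2 + (pvDelta p ((n : Int) - 1)).2) := by
  simp only [pvBodyB, pvDelta, List.mem_cons, List.not_mem_nil, or_false]
  by_cases hdu : p = 'D' ∨ p = 'U'
  · have hrl : ¬(p = 'R' ∨ p = 'L') := by rcases hdu with rfl | rfl <;> decide
    simp [hdu, hrl]
  · by_cases hrl : p = 'R' ∨ p = 'L' <;> simp [hdu, hrl]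

theorem pvFoldA (cs : List Char) : ∀ (p : Char) (acc : Int × Int),
    ((p :: cs).zip cs).foldl pvBodyA acc
      = (acc.1 + (pvPairs p cs).1, acc.2 + (pvPairs p cs).2) := by
  induction cs with
  | nil => intro p acc; simp [pvPairs]
  | cons c cs ih =>
    intro p acc
    show List.foldl pvBodyA (pvBodyA acc (p, c)) ((c :: cs).zip cs) = _
    rw [ih, pvBodyA_eq]
    simp only [pvPairs, Prod.ext_iff]
    by_cases h : c = p
    · simp only [if_pos h]
      constructor <;> ring
    · simp only [if_neg h]
      constructor <;> ring

theorem pvFoldB (cs : List Char) : ∀ (p : Char) (n : Nat) (acc : Int × Int),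
    (pvRunsAux p n cs).foldl pvBodyB acc
      = (acc.1 + (pvDelta p ((n : Int) - 1)).1 + (pvPairs p cs).1,
         acc.2 + (pvDelta p ((n : Int) - 1)).2 + (pvPairs p cs).2) := by
  induction cs with
  | nil =>
    intro p n acc
    show List.foldl pvBodyB acc [(p, n)] = _
    simp only [List.foldl, pvBodyB_eq, pvPairs, Prod.ext_iff]
    constructor <;> ring
  | cons c cs ih =>
    intro p n acc
    rw [show pvRunsAux p n (c :: cs)
          = if c = p then pvRunsAux p (n + 1) cs else (p, n) :: pvRunsAux c 1 cs from rfl]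
    by_cases h : c = p
    · rw [if_pos h, ih]
      subst h
      simp only [pvPairs, pvDelta, Prod.ext_iff]
      constructor <;> split_ifs <;> push_cast <;> try ring
    · rw [if_neg h]
      show List.foldl pvBodyB (pvBodyB acc (p, n)) (pvRunsAux c 1 cs) = _
      rw [ih, pvBodyB_eq]
      simp only [pvPairs, if_neg h, pvDelta, Prod.ext_iff]
      constructor <;> split_ifs <;> push_cast <;> try ring

-- the indexed pairs A reads are exactly the adjacent pairs of the character list
theorem pvMapPairs (cs : List Char) :
    (List.range (cs.length - 1)).map
        (fun (k : Nat) => (PySem.List.pyGetD cs (k : Int) ' ', PySem.List.pyGetD cs ((k : Int) + 1) ' '))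
      = cs.zip cs.tail := by
  apply List.ext_getElem
  · simp [List.length_zip]; try omega
  · intro k h1 h2
    simp only [List.getElem_map, List.getElem_range, List.getElem_zip]
    have hlen : k < cs.length - 1 := by simpa using h1
    have e1 : PySem.List.pyGetD cs (k : Int) ' ' = cs[k] := by
      rw [PySem.List.pyGetD_eq_getElem] <;> simp; try omega
    have e2 : PySem.List.pyGetD cs ((k : Int) + 1) ' ' = cs[k + 1] := by
      have h3 : ((k : Int) + 1) = ((k + 1 : Nat) : Int) := by push_cast; ring
      rw [h3, PySem.List.pyGetD_eq_getElem] <;> simp <;> try omega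
    rw [e1, e2]
    refine Prod.ext (by congr 1; try omega) ?_
    rw [List.getElem_tail]

-- the whole computation, on the underlying character list
theorem pvKey (c : Char) (cs : List Char) :
    (PySem.List.pyRange 1 (((c :: cs).length : Nat) : Int) 1).foldl
      (fun (acc : Int × Int) (i : Int) =>
        if PySem.List.pyGetD (c :: cs) i ' ' = PySem.List.pyGetD (c :: cs) (i - 1) ' ' then
          if PySem.List.pyGetD (c :: cs) i ' ' ∈ (['R', 'L'] : List Char) then
            ((if PySem.List.pyGetD (c :: cs) i ' ' ∈ (['D', 'U'] : List Char) then (acc.1, acc.2 + 1) else acc).1 + 1,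
             (if PySem.List.pyGetD (c :: cs) i ' ' ∈ (['D', 'U'] : List Char) then (acc.1, acc.2 + 1) else acc).2)
          else if PySem.List.pyGetD (c :: cs) i ' ' ∈ (['D', 'U'] : List Char) then (acc.1, acc.2 + 1) else acc
        else acc) ((0 : Int), (0 : Int))
    = (pvRuns (c :: cs)).foldl
        (fun (acc : Int × Int) (p : Char × Nat) =>
          if p.1 ∈ (['D', 'U'] : List Char) then (acc.1, acc.2 + ((p.2 : Int) - 1))
          else if p.1 ∈ (['R', 'L'] : List Char) then (acc.1 + ((p.2 : Int) - 1), acc.2)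
          else acc) ((0 : Int), (0 : Int)) := by
  rw [PySem.List.pyRange_one]
  rw [show ((((c :: cs).length : Nat) : Int) - 1).toNat = (c :: cs).length - 1 by omega]
  rw [List.foldl_map]
  have hbody : (fun (acc : Int × Int) (k : Nat) =>
      (fun (acc : Int × Int) (i : Int) =>
        if PySem.List.pyGetD (c :: cs) i ' ' = PySem.List.pyGetD (c :: cs) (i - 1) ' ' then
          if PySem.List.pyGetD (c :: cs) i ' ' ∈ (['R', 'L'] : List Char) then
            ((if PySem.List.pyGetD (c :: cs) i ' ' ∈ (['D', 'U'] : List Char) then (acc.1, acc.2 + 1) else acc).1 + 1,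
             (if PySem.List.pyGetD (c :: cs) i ' ' ∈ (['D', 'U'] : List Char) then (acc.1, acc.2 + 1) else acc).2)
          else if PySem.List.pyGetD (c :: cs) i ' ' ∈ (['D', 'U'] : List Char) then (acc.1, acc.2 + 1) else acc
        else acc) acc (1 + (k : Int)))
      = (fun (acc : Int × Int) (k : Nat) =>
          pvBodyA acc (PySem.List.pyGetD (c :: cs) (k : Int) ' ', PySem.List.pyGetD (c :: cs) ((k : Int) + 1) ' ')) := by
    funext acc k
    have e1 : (1 : Int) + (k : Int) = (k : Int) + 1 := by ring
    have e2 : (k : Int) + 1 - 1 = (k : Int) := by ring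
    simp only [e1, e2, pvBodyA]
  rw [hbody, ← List.foldl_map, pvMapPairs (c :: cs)]
  show ((c :: cs).zip cs).foldl pvBodyA _ = (pvRunsAux c 1 cs).foldl pvBodyB _
  rw [pvFoldA cs c, pvFoldB cs c 1]
  simp [pvDelta]

-- ===== VERDICT (by name: the statement is the Claim_ definition above) =====
theorem get_repeated_lengths_spec : Claim_equal_get_repeated_lengths := by
  intro s _
  unfold Spec_get_repeated_lengths
  simp only [get_repeated_lengths, get_repeated_lengths_alt, PySem.Str.len_eq]
  cases hcs : s.toList with
  | nil => simp [PySem.List.pyRange_one_eq_nil (by simp : (0 : Int) ≤ 1), pvRuns]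
  | cons c cs => rw [pvKey c cs]
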